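-- pv_equiv track=rewrite | github.com/jem0101/BigSwag-SQA2022-AUBURN | TestOrchestrator4ML-main/resources/Data/supervised/GITHUB_REPOS/kashefy@caffe_sandbox/nideep/datasets/dataset_utils.py | get_train_val_split_from_names
-- ===== SOURCE A (Python) =====
-- def get_train_val_split_from_names(src, val_list):
--     """
--     Get indices split for train and validation entity names subset
--
--     src -- list of all entities in dataset
--     val_list -- contains entities that belong to the validation subset
--
--     """
--     train_idx = []
--     val_idx = []
--
--     len_ = len(val_list)
--
--     for i, x in enumerate(src):
--
--         found = False
--         j = 0
--         while j < len_ and not found: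
--
--             found = val_list[j] in x
--             j += 1
--
--         if found:
--             val_idx.append(i)
--         else:
--             train_idx.append(i)
--
--     return train_idx, val_idx
-- ===== SOURCE B (Python) =====
-- def get_train_val_split_from_names(src, val_list):
--     # val-major worklist: each val name filters the still-unmatched entities;
--     # survivors are train, the complement (in index order) is val
--     unmatched = list(range(len(src)))
--     for v in val_list:
--         unmatched = [i for i in unmatched if v not in src[i]]
--     um = set(unmatched)
--     val_idx = [i for i in range(len(src)) if i not in um]
--     return unmatched, val_idx
-- ===== Notes on version B (the rewrite author's own statement) =====
-- stated objective: alternative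
-- what changed: B inverts the traversal: instead of A's per-entity inner while-scan of val_list, B lets each val name filter a shrinking worklist of still-unmatched indices, returning the surviving worklist as train and its complement over range(len(src)) as val.
import Mathlib
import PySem

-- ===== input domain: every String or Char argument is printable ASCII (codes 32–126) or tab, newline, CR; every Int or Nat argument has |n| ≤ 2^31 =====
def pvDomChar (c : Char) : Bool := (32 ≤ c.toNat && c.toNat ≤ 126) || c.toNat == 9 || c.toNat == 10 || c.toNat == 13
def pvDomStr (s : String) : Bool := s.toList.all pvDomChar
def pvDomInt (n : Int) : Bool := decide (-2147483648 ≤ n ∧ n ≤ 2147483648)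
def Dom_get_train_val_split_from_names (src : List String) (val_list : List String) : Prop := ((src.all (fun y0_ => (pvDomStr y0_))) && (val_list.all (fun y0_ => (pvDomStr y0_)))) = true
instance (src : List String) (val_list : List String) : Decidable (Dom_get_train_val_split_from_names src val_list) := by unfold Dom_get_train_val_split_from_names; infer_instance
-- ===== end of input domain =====

-- B inverts the traversal: each val name filters a shrinking worklist of still-unmatched
-- indices (train = survivors, val = complement), instead of A's per-entity inner while-scan.


-- ===== PORT A =====
-- the inner 'while j < len_ and not found' loop, structurally over the remaining val_list
def pvWhileFound (x : String) (vs : List String) (found : Bool) : Bool :=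
  match vs with
  | [] => found
  | v :: rest => if found then found else pvWhileFound x rest (PySem.Str.isIn v x)

def get_train_val_split_from_names (src : List String) (val_list : List String) : List Int × List Int :=
  (PySem.List.enumerate src 0).foldl
    (fun (acc : List Int × List Int) p =>
      -- found = pvWhileFound …; if found: val_idx.append(i) else train_idx.append(i)
      if pvWhileFound p.2 val_list false then (acc.1, acc.2 ++ [p.1]) else (acc.1 ++ [p.1], acc.2))
    ([], [])

-- ===== PORT B =====
def get_train_val_split_from_names_alt (src : List String) (val_list : List String) : List Int × List Int :=
  -- unmatched = list(range(len(src))); each v filters it; val_idx = complement of the survivors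
  let unmatched := val_list.foldl
    (fun um v => um.filter (fun i => !PySem.Str.isIn v (PySem.List.pyGetD src i "")))
    (PySem.List.pyRange 0 (src.length : Int) 1)
  (unmatched,
   (PySem.List.pyRange 0 (src.length : Int) 1).filter (fun i => !unmatched.contains i))

-- ===== PRECONDITION & SPEC =====
def Spec_get_train_val_split_from_names (src : List String) (val_list : List String) (out : List Int × List Int) : Prop := out = get_train_val_split_from_names_alt src val_list
instance (src : List String) (val_list : List String) (out : List Int × List Int) : Decidable (Spec_get_train_val_split_from_names src val_list out) := by unfold Spec_get_train_val_split_from_names; infer_instance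

-- ===== CLAIM (what is proved, stated in full; the proofs are below) =====
def Claim_equal_get_train_val_split_from_names : Prop := ∀ (src : List String) (val_list : List String), Dom_get_train_val_split_from_names src val_list → Spec_get_train_val_split_from_names src val_list (get_train_val_split_from_names src val_list)

-- ===== LEMMAS AND PROOFS =====

theorem pvWhileFound_true (x : String) (vs : List String) : pvWhileFound x vs true = true := by
  cases vs <;> simp [pvWhileFound]

-- A's early-exit while-loop computes "some val name occurs in x"
theorem pvWhileFound_eq_any (x : String) (vs : List String) :
    pvWhileFound x vs false = vs.any (fun v => PySem.Str.isIn v x) := by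
  induction vs with
  | nil => rfl
  | cons v rest ih =>
    have hstep : pvWhileFound x (v :: rest) false = pvWhileFound x rest (PySem.Str.isIn v x) := rfl
    rw [hstep, List.any_cons]
    cases h : PySem.Str.isIn v x with
    | false => simpa using ih
    | true => simp [pvWhileFound_true]

-- B's chain of filtering passes is one filter by "no val name seen so far occurs"
theorem foldl_filter_passes (src : List String) (vs : List String) :
    ∀ (R : List Int),
    vs.foldl (fun um v => um.filter (fun i => !PySem.Str.isIn v (PySem.List.pyGetD src i ""))) R
      = R.filter (fun i => !vs.any (fun v => PySem.Str.isIn v (PySem.List.pyGetD src i ""))) := by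
  induction vs with
  | nil => intro R; simp
  | cons v rest ih =>
    intro R
    rw [List.foldl_cons, ih, List.filter_filter]
    apply List.filter_congr
    intro i _
    cases hv : PySem.Str.isIn v (PySem.List.pyGetD src i "") <;>
      cases hr : rest.any (fun w => PySem.Str.isIn w (PySem.List.pyGetD src i "")) <;>
      simp only [List.any_cons, hv, hr] <;> rfl

-- an if-none-some filterMap over indices is a filter (both polarities)
theorem filterMap_if_to_filter_not (l : List Int) (c : Int → Bool) :
    l.filterMap (fun j => if c j then none else some j) = l.filter (fun j => !c j) := by
  induction l with
  | nil => rfl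
  | cons j rest ih => cases hj : c j <;> simp [hj, ih]

theorem filterMap_if_to_filter (l : List Int) (c : Int → Bool) :
    l.filterMap (fun j => if c j then some j else none) = l.filter c := by
  induction l with
  | nil => rfl
  | cons j rest ih => cases hj : c j <;> simp [hj, ih]

-- enumerate of the mapped predicate list, as a map over the index range
theorem enum_map_pred (src : List String) (g : String → Bool) :
    PySem.List.enumerate (src.map g) 0
      = (PySem.List.pyRange 0 (src.length : Int) 1).map
          (fun j => (j, g (PySem.List.pyGetD src j ""))) := by
  have h := PySem.List.enumerate_eq_map_pyRange (src.map g) (g "")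
  simpa [PySem.List.pyGetD_map] using h

-- A's accumulator loop, against B's filterMap reading of the fully-marked array
theorem loop_eq (vl : List String) :
    ∀ (src : List String) (s : Int) (t v : List Int),
    (PySem.List.enumerate src s).foldl
      (fun (acc : List Int × List Int) p =>
        if pvWhileFound p.2 vl false then (acc.1, acc.2 ++ [p.1]) else (acc.1 ++ [p.1], acc.2)) (t, v)
    = (t ++ (PySem.List.enumerate (src.map (fun x => vl.any (fun w => PySem.Str.isIn w x))) s).filterMap
          (fun p => if p.2 then none else some p.1),
       v ++ (PySem.List.enumerate (src.map (fun x => vl.any (fun w => PySem.Str.isIn w x))) s).filterMap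
          (fun p => if p.2 then some p.1 else none)) := by
  intro src
  induction src with
  | nil => intro s t v; simp [PySem.List.enumerate_nil]
  | cons x xs ih =>
    intro s t v
    rw [List.map_cons, PySem.List.enumerate_cons, PySem.List.enumerate_cons, List.foldl_cons]
    simp only [pvWhileFound_eq_any] at ih ⊢
    cases h : vl.any (fun w => PySem.Str.isIn w x) with
    | true =>
      rw [if_pos rfl, ih (s+1) t (v ++ [s])]
      simp
    | false =>
      rw [if_neg (by simp), ih (s+1) (t ++ [s]) v]
      simp

-- ===== VERDICT (by name: the statement is the Claim_ definition above) =====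
theorem get_train_val_split_from_names_spec : Claim_equal_get_train_val_split_from_names := by
  intro src val_list _
  show get_train_val_split_from_names src val_list = get_train_val_split_from_names_alt src val_list
  unfold get_train_val_split_from_names get_train_val_split_from_names_alt
  have hA := loop_eq val_list src 0 [] []
  simp only [List.nil_append] at hA
  rw [hA, foldl_filter_passes, enum_map_pred, List.filterMap_map, List.filterMap_map]
  show (_, _) = (_, _)
  refine Prod.ext ?_ ?_
  · simpa using filterMap_if_to_filter_not (PySem.List.pyRange 0 (src.length : Int) 1)
      (fun j => val_list.any (fun w => PySem.Str.isIn w (PySem.List.pyGetD src j "")))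
  · rw [show ((fun p : Int × Bool => if p.2 then some p.1 else none) ∘
        (fun j => (j, val_list.any (fun w => PySem.Str.isIn w (PySem.List.pyGetD src j "")))))
        = (fun j => if val_list.any (fun w => PySem.Str.isIn w (PySem.List.pyGetD src j "")) then some j else none) from rfl,
      filterMap_if_to_filter]
    apply Eq.symm
    apply List.filter_congr
    intro i hi
    cases hP : val_list.any (fun w => PySem.Str.isIn w (PySem.List.pyGetD src i "")) <;>
      simp [List.contains_eq_mem, List.mem_filter, hi] <;> simpa using hP
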